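-- pv_equiv track=rewrite | github.com/svezhest/itmo | dm labs/S1/DM 1/c.py | checkM
-- ===== SOURCE A (Python) =====
-- def checkM(bintable):
--     length = len(bintable)
--     if length > 1:
--         length //= 2
--         for i in range(length):
--             if bintable[i] > bintable[length + i]:
--                 return False
--         return checkM(bintable[:length]) and checkM(bintable[length:])
--     else:
--         return True
-- ===== SOURCE B (Python) =====
-- def checkM(bintable):
--     stack = [(0, len(bintable))]
--     while stack:
--         lo, hi = stack.pop()
--         n = hi - lo
--         if n > 1:
--             half = n // 2
--             for i in range(half):
--                 if bintable[lo + i] > bintable[lo + half + i]: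
--                     return False
--             stack.append((lo, lo + half))
--             stack.append((lo + half, hi))
--     return True
-- ===== Notes on version B (the rewrite author's own statement) =====
-- stated objective: alternative
-- what changed: Replaces A's recursion over list slices with an iterative explicit-stack worklist over (lo,hi) index ranges, comparing elements in place and never building sliced copies.
import Mathlib
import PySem

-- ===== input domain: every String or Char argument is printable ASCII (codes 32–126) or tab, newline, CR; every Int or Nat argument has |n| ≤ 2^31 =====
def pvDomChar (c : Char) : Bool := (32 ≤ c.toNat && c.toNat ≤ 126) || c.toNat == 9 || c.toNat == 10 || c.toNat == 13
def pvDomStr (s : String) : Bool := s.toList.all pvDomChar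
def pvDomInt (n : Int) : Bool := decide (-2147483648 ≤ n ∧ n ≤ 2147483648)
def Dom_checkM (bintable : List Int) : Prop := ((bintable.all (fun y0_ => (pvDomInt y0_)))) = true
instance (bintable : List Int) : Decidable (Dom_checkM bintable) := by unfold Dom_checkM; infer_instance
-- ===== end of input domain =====

-- B replaces A's recursion over list slices by an iterative explicit-stack worklist over
-- (lo, hi) index ranges into the original list (alternative decomposition, no sliced copies).

-- ===== PORT A =====
-- A's recursion over slices; bintable[:half] = take half, bintable[half:] = drop half
-- (exact here: 0 ≤ half ≤ len).  The for-loop with early 'return False' is the 'all'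
-- below; its indices are in range, so getD 0 is exact for bintable[i].
def checkM (bintable : List Int) : Bool :=
  let length := bintable.length
  if _h : length > 1 then
    let half := length / 2
    if (List.range half).all
        (fun i => !decide (bintable.getD i 0 > bintable.getD (half + i) 0)) then
      checkM (bintable.take half) && checkM (bintable.drop half)
    else false
  else true
termination_by bintable.length
decreasing_by
  · simp only [List.length_take]; omega
  · simp only [List.length_drop]; omega

-- ===== PORT B =====
-- weight of one stack entry for the worklist termination measure
def pvWf (n : Nat) : Nat := if n ≤ 1 then 1 else 3 * n - 2

-- Source B's while-loop over the explicit stack (head = top of stack; Python pushes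
-- (lo, lo+half) then (lo+half, hi), so (lo+half, hi) is popped first); the inner
-- for-loop with early 'return False' is the 'all', indices in range so getD 0 is exact.
def checkMLoop (bintable : List Int) : List (Nat × Nat) → Bool
  | [] => true
  | (lo, hi) :: stack =>
    let n := hi - lo
    if _h : n > 1 then
      let half := n / 2
      if (List.range half).all
          (fun i => !decide (bintable.getD (lo + i) 0 > bintable.getD (lo + half + i) 0)) then
        checkMLoop bintable ((lo + half, hi) :: (lo, lo + half) :: stack)
      else false
    else checkMLoop bintable stack
termination_by stk => (stk.map (fun p => pvWf (p.2 - p.1))).sum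
decreasing_by
  · simp only [List.map_cons, List.sum_cons, pvWf]
    split_ifs <;> omega
  · simp only [List.map_cons, List.sum_cons, pvWf]
    split_ifs <;> omega

def checkM_alt (bintable : List Int) : Bool :=
  checkMLoop bintable [(0, bintable.length)]

-- ===== PRECONDITION & SPEC =====
def Spec_checkM (bintable : List Int) (out : Bool) : Prop := out = checkM_alt bintable
instance (bintable : List Int) (out : Bool) : Decidable (Spec_checkM bintable out) := by unfold Spec_checkM; infer_instance

-- ===== CLAIM (what is proved, stated in full; the proofs are below) =====
def Claim_equal_checkM : Prop := ∀ (bintable : List Int), Dom_checkM bintable → Spec_checkM bintable (checkM bintable)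

-- ===== LEMMAS AND PROOFS =====

-- A's verdict on the index segment [lo, hi) of bt
def segCheck (bt : List Int) (p : Nat × Nat) : Bool :=
  checkM ((bt.drop p.1).take (p.2 - p.1))

lemma all_congr_mem {α : Type} (l : List α) (f g : α → Bool)
    (h : ∀ a ∈ l, f a = g a) : l.all f = l.all g := by
  induction l with
  | nil => rfl
  | cons a l ih => simp_all

lemma getD_seg (bt : List Int) (lo n i : Nat) (hi : i < n) :
    ((bt.drop lo).take n).getD i 0 = bt.getD (lo + i) 0 := by
  simp [List.getD_eq_getElem?_getD, hi, List.getElem?_drop]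

lemma checkM_short (bt : List Int) (h : bt.length ≤ 1) : checkM bt = true := by
  rw [checkM]; simp [show ¬ bt.length > 1 by omega]

-- B's in-place comparison pass on [lo, hi) coincides with A's pass on the slice
lemma seg_inner (bt : List Int) (lo hi : Nat) :
    ((List.range ((hi - lo) / 2)).all
        (fun i => !decide (((bt.drop lo).take (hi - lo)).getD i 0 >
          ((bt.drop lo).take (hi - lo)).getD ((hi - lo) / 2 + i) 0)))
    = ((List.range ((hi - lo) / 2)).all
        (fun i => !decide (bt.getD (lo + i) 0 > bt.getD (lo + (hi - lo) / 2 + i) 0))) := by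
  apply all_congr_mem
  intro i hi'
  simp only [List.mem_range] at hi'
  rw [getD_seg bt lo (hi - lo) i (by omega),
      getD_seg bt lo (hi - lo) ((hi - lo) / 2 + i) (by omega)]
  ring_nf

-- loop invariant: for in-bounds segments, the worklist decides the conjunction of
-- A's verdicts over the stacked segments
lemma checkMLoop_eq_all (bt : List Int) (stk : List (Nat × Nat))
    (hb : ∀ p ∈ stk, p.1 ≤ p.2 ∧ p.2 ≤ bt.length) :
    checkMLoop bt stk = stk.all (segCheck bt) := by
  revert hb
  induction stk using checkMLoop.induct bt with
  | case1 => intro _; simp [checkMLoop]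
  | case2 lo hi stack _n h _half hall ih =>
    intro hb
    have hbd := hb (lo, hi) (by simp)
    have hlo : lo ≤ hi := hbd.1
    have hhi : hi ≤ bt.length := hbd.2
    have hhalf1 : 1 ≤ (hi - lo) / 2 := by omega
    have hhalfn : (hi - lo) / 2 < hi - lo := by omega
    rw [checkMLoop]
    rw [dif_pos h, if_pos hall]
    rw [ih (by
      intro p hp
      simp only [List.mem_cons] at hp
      rcases hp with rfl | rfl | hp
      · constructor <;> omega
      · constructor <;> omega
      · exact hb p (by simp [hp]))]
    have hlen : ((bt.drop lo).take (hi - lo)).length = hi - lo := by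
      simp; omega
    have hA : segCheck bt (lo, hi)
        = (segCheck bt (lo, lo + (hi - lo) / 2) && segCheck bt (lo + (hi - lo) / 2, hi)) := by
      unfold segCheck
      rw [checkM]
      simp only [hlen]
      rw [dif_pos (by omega : hi - lo > 1)]
      rw [if_pos (by rw [seg_inner]; exact hall)]
      have h1 : List.take ((hi - lo) / 2) (List.take (hi - lo) (List.drop lo bt))
          = List.take (lo + (hi - lo) / 2 - lo) (List.drop lo bt) := by
        rw [List.take_take]; congr 1; omega
      have h2 : List.drop ((hi - lo) / 2) (List.take (hi - lo) (List.drop lo bt))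
          = List.take (hi - (lo + (hi - lo) / 2)) (List.drop (lo + (hi - lo) / 2) bt) := by
        rw [List.drop_take, List.drop_drop]
        congr 1
        omega
      rw [h1, h2]
    simp only [List.all_cons, hA]
    cases segCheck bt (lo, lo + (hi - lo) / 2) <;>
      cases segCheck bt (lo + (hi - lo) / 2, hi) <;> simp
  | case3 lo hi stack _n h _half hall =>
    intro hb
    have hbd := hb (lo, hi) (by simp)
    rw [checkMLoop]
    rw [dif_pos h, if_neg hall]
    have hfalse : segCheck bt (lo, hi) = false := by
      unfold segCheck
      have hlen : ((bt.drop lo).take (hi - lo)).length = hi - lo := by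
        simp; omega
      rw [checkM]
      simp only [hlen]
      rw [dif_pos (by omega : hi - lo > 1)]
      rw [if_neg (by rw [seg_inner]; exact hall)]
    simp [hfalse]
  | case4 lo hi stack _n h ih =>
    intro hb
    rw [checkMLoop]
    rw [dif_neg h]
    rw [ih (by intro p hp; exact hb p (by simp [hp]))]
    have htrue : segCheck bt (lo, hi) = true := by
      unfold segCheck
      apply checkM_short
      simp; omega
    simp [htrue]

-- ===== VERDICT (by name: the statement is the Claim_ definition above) =====
theorem checkM_spec : Claim_equal_checkM := by
  intro bt _
  unfold Spec_checkM checkM_alt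
  rw [checkMLoop_eq_all bt [(0, bt.length)] (by simp)]
  simp [segCheck]
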